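-- pv_equiv track=rewrite | github.com/981377660LMT/algorithm-study | 22_专题/前缀与差分/差分数组/deltaDict/2015. 每段建筑物的平均高度.py | averageHeightOfBuildings
-- ===== SOURCE A (Python) =====
-- from typing import List
-- from collections import defaultdict
--
-- def averageHeightOfBuildings(buildings: List[List[int]]) -> List[List[int]]:
--     # 总高度，个数
--     diff = defaultdict(lambda: [0, 0])
--     for start, end, delta in buildings:
--         diff[start][0] += delta
--         diff[end][0] -= delta
--         diff[start][1] += 1
--         diff[end][1] -= 1
--
--     res = []
--     # 区间起点，高度累加，个数累加
--     curPos, curSum, curCount = 0, 0, 0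
--     for key in sorted(diff):
--         delta, deltaCount = diff[key]
--         if curSum > 0:
--             cand = [curPos, key, curSum // curCount]
--
--             # 区间合并
--             if res and res[-1][1] == curPos and res[-1][2] == cand[2]:
--                 res[-1][1] = key
--             else:
--                 res.append(cand)
--
--         curPos = key
--         curSum += delta
--         curCount += deltaCount
--
--     return res
-- ===== SOURCE B (Python) =====
-- def averageHeightOfBuildings(buildings):
--     # sweep adjacent distinct coordinates, computing each segment's coverage directly
--     coords = sorted({x for s, e, _ in buildings for x in (s, e)})
--
--     def cover(x):
--         total = count = 0
--         for s, e, h in buildings: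
--             t = (s <= x) - (e <= x)
--             total += h * t
--             count += t
--         return total, count
--
--     res = []
--     for p, q in zip(coords, coords[1:]):
--         total, count = cover(p)
--         if total > 0:
--             h = total // count
--             if res and res[-1][1] == p and res[-1][2] == h:
--                 res[-1][1] = q
--             else:
--                 res.append([p, q, h])
--     return res
-- ===== Notes on version B (the rewrite author's own statement) =====
-- stated objective: alternative
-- what changed: B drops the difference-dict accumulation entirely: it sorts the distinct coordinates and, for each adjacent coordinate pair, recomputes the segment's signed (height-sum, count) coverage directly from the buildings; Pre_ excludes only inputs on which A raises (a row of length other than 3, or a segment with positive height-sum and zero count, where the division raises).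
import Mathlib
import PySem

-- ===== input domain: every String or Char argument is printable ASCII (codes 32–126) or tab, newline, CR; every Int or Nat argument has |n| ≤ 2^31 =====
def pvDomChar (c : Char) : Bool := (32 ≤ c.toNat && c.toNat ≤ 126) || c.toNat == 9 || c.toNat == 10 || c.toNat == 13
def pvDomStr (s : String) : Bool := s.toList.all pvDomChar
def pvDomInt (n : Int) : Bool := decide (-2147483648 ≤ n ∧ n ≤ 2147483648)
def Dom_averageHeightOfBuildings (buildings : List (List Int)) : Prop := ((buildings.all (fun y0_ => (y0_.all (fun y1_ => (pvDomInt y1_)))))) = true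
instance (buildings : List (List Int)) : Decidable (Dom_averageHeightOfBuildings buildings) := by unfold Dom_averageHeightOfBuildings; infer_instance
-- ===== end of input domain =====

-- B replaces A's difference-dict accumulation by a sweep over adjacent distinct coordinates that
-- computes each segment's coverage directly from the buildings (alternative decomposition, not faster).

-- ===== PORT A =====
-- the loop body 'diff[start][0] += delta; diff[end][0] -= delta; diff[start][1] += 1; diff[end][1] -= 1'
-- (Python raises ValueError when unpacking a row of length ≠ 3; such inputs are outside Pre_, the helper leaves the dict unchanged there)
def stepDiffA (d : PySem.Dict Int (Int × Int)) (b : List Int) : PySem.Dict Int (Int × Int) :=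
  match b with
  | [s, e, delta] =>
      let d1 := d.modify s (0, 0) (fun v => (v.1 + delta, v.2))
      let d2 := d1.modify e (0, 0) (fun v => (v.1 - delta, v.2))
      let d3 := d2.modify s (0, 0) (fun v => (v.1, v.2 + 1))
      d3.modify e (0, 0) (fun v => (v.1, v.2 - 1))
  | _ => d

-- the loop 'for key in sorted(diff): …'; res rows always have length 3, so the Python index
-- accesses res[-1][1], res[-1][2], cand[2] and the assignment res[-1][1] = key are exact as pyGetD/pySetD
def sweepA (d : PySem.Dict Int (Int × Int)) : List Int → List (List Int) → Int → Int → Int → List (List Int)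
  | [], res, _, _, _ => res
  | key :: ks, res, curPos, curSum, curCount =>
      let v := d.getD key (0, 0)
      let res' :=
        if curSum > 0 then
          let cand : List Int := [curPos, key, PySem.Int.floordiv curSum curCount]
          match res.getLast? with
          | some last =>
              if PySem.List.pyGetD last 1 0 = curPos ∧ PySem.List.pyGetD last 2 0 = PySem.List.pyGetD cand 2 0 then
                res.dropLast ++ [PySem.List.pySetD last 1 key]
              else res ++ [cand]
          | none => res ++ [cand]
        else res
      sweepA d ks res' key (curSum + v.1) (curCount + v.2)

def averageHeightOfBuildings (buildings : List (List Int)) : List (List Int) :=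
  -- diff := the difference dict; written inline (twice) instead of a let-binding
  sweepA (buildings.foldl stepDiffA PySem.Dict.empty)
    (PySem.List.sorted (buildings.foldl stepDiffA PySem.Dict.empty).keys (fun x => x) false)
    [] 0 0 0

-- ===== PORT B =====
-- the two coordinates of a row (Python raises on rows of length ≠ 3; outside Pre_)
def rowCoordsB (b : List Int) : List Int :=
  match b with
  | [s, e, _] => [s, e]
  | _ => []

-- inner function cover(x): total, count accumulated over all buildings
def coverB (buildings : List (List Int)) (x : Int) : Int × Int :=
  buildings.foldl
    (fun (p : Int × Int) b =>
      match b with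
      | [s, e, h] =>
          let t : Int := (if s ≤ x then 1 else 0) - (if e ≤ x then 1 else 0)
          (p.1 + h * t, p.2 + t)
      | _ => p)
    (0, 0)

-- 'for p, q in zip(coords, coords[1:]): …' appending to res; res rows always have length 3
def sweepB (buildings : List (List Int)) : List (Int × Int) → List (List Int) → List (List Int)
  | [], res => res
  | (p, q) :: rest, res =>
      let tc := coverB buildings p
      let res' :=
        if tc.1 > 0 then
          let h := PySem.Int.floordiv tc.1 tc.2
          match res.getLast? with
          | some last =>
              if PySem.List.pyGetD last 1 0 = p ∧ PySem.List.pyGetD last 2 0 = h then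
                res.dropLast ++ [PySem.List.pySetD last 1 q]
              else res ++ [[p, q, h]]
          | none => res ++ [[p, q, h]]
        else res
      sweepB buildings rest res'

-- coords := sorted(set(...)); written inline (twice) instead of a let-binding
def averageHeightOfBuildings_alt (buildings : List (List Int)) : List (List Int) :=
  sweepB buildings
    ((PySem.List.sorted (PySem.Set.ofList (buildings.flatMap rowCoordsB)) (fun x => x) false).zip
      (PySem.List.sorted (PySem.Set.ofList (buildings.flatMap rowCoordsB)) (fun x => x) false).tail)
    []

-- ===== PRECONDITION & SPEC =====
-- contribution of one building to (height-sum, count) of the segment just right of coordinate x (states Pre_ only)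
def pvContrib (x : Int) (b : List Int) : Int × Int :=
  match b with
  | [s, e, d] => (d * ((if s ≤ x then 1 else 0) - (if e ≤ x then 1 else 0)),
                  (if s ≤ x then 1 else 0) - (if e ≤ x then 1 else 0))
  | _ => (0, 0)

def pvCover (buildings : List (List Int)) (x : Int) : Int × Int :=
  match buildings with
  | [] => (0, 0)
  | b :: r => ((pvContrib x b).1 + (pvCover r x).1, (pvContrib x b).2 + (pvCover r x).2)

-- Pre_ excludes exactly the inputs on which Python A raises: a row of length ≠ 3 (ValueError on
-- unpacking) or a sweep segment with positive height-sum but zero building-count (ZeroDivisionError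
-- in 'curSum // curCount'; B performs the same division there and raises identically).
def Pre_averageHeightOfBuildings (buildings : List (List Int)) : Prop :=
  (∀ b ∈ buildings, b.length = 3) ∧
  (∀ x ∈ buildings.flatMap (fun b => b.take 2),
      (pvCover buildings x).1 > 0 → (pvCover buildings x).2 ≠ 0)
instance (buildings : List (List Int)) : Decidable (Pre_averageHeightOfBuildings buildings) := by
  unfold Pre_averageHeightOfBuildings; infer_instance

def pvWitness_averageHeightOfBuildings : List (List Int) := [[0, 2, 5], [1, 3, 7]]

def Spec_averageHeightOfBuildings (buildings : List (List Int)) (out : List (List Int)) : Prop := out = averageHeightOfBuildings_alt buildings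
instance (buildings : List (List Int)) (out : List (List Int)) : Decidable (Spec_averageHeightOfBuildings buildings out) := by unfold Spec_averageHeightOfBuildings; infer_instance

-- ===== CLAIM (what is proved, stated in full; the proofs are below) =====
def Claim_equal_averageHeightOfBuildings : Prop := ∀ (buildings : List (List Int)), Dom_averageHeightOfBuildings buildings → Pre_averageHeightOfBuildings buildings → Spec_averageHeightOfBuildings buildings (averageHeightOfBuildings buildings)

-- ===== LEMMAS AND PROOFS =====

-- contribution of one building to the difference dict at key x
def pvDeltaC (x : Int) (b : List Int) : Int × Int :=
  match b with
  | [s, e, d] => (d * ((if x = s then 1 else 0) - (if x = e then 1 else 0)),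
                  (if x = s then 1 else 0) - (if x = e then 1 else 0))
  | _ => (0, 0)

def pvDelta (buildings : List (List Int)) (x : Int) : Int × Int :=
  match buildings with
  | [] => (0, 0)
  | b :: r => ((pvDeltaC x b).1 + (pvDelta r x).1, (pvDeltaC x b).2 + (pvDelta r x).2)

theorem getD_stepDiffA (d : PySem.Dict Int (Int × Int)) (b : List Int) (k : Int) :
    (stepDiffA d b).getD k (0, 0) =
      ((d.getD k (0, 0)).1 + (pvDeltaC k b).1, (d.getD k (0, 0)).2 + (pvDeltaC k b).2) := by
  rcases b with _ | ⟨s, _ | ⟨e, _ | ⟨dl, _ | ⟨w, r⟩⟩⟩⟩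
  case nil => simp [stepDiffA, pvDeltaC]
  case cons.nil => simp [stepDiffA, pvDeltaC]
  case cons.cons.nil => simp [stepDiffA, pvDeltaC]
  case cons.cons.cons.cons => simp [stepDiffA, pvDeltaC]
  simp only [stepDiffA, PySem.Dict.getD_modify, pvDeltaC]
  by_cases hse : s = e
  · subst hse
    by_cases hs : k = s <;>
      simp [hs] <;> (try apply Prod.ext) <;> (try simp) <;> (try ring) <;>
        (try exact ⟨trivial, trivial⟩)
  · have hes : ¬ e = s := fun hh => hse hh.symm
    by_cases hs : k = s <;> by_cases he : k = e
    · exfalso; omega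
    · subst hs
      simp [hse, hes, he] <;> (try apply Prod.ext) <;> (try simp) <;> (try ring) <;>
        (try exact ⟨trivial, trivial⟩)
    · subst he
      simp [hse, hes, hs] <;> (try apply Prod.ext) <;> (try simp) <;> (try ring) <;>
        (try exact ⟨trivial, trivial⟩)
    · simp [hse, hes, hs, he]

theorem getD_foldl_stepDiffA (bs : List (List Int)) (d : PySem.Dict Int (Int × Int)) (k : Int) :
    (bs.foldl stepDiffA d).getD k (0, 0) =
      ((d.getD k (0, 0)).1 + (pvDelta bs k).1, (d.getD k (0, 0)).2 + (pvDelta bs k).2) := by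
  induction bs generalizing d with
  | nil => simp [pvDelta]
  | cons b r ih =>
      simp only [List.foldl_cons, ih, getD_stepDiffA, pvDelta]
      apply Prod.ext <;> simp <;> ring

theorem getD_diffA (bs : List (List Int)) (k : Int) :
    (bs.foldl stepDiffA PySem.Dict.empty).getD k (0, 0) = pvDelta bs k := by
  rw [getD_foldl_stepDiffA, PySem.Dict.getD_empty]
  apply Prod.ext <;> simp

theorem keys_stepDiffA_mem (d : PySem.Dict Int (Int × Int)) (b : List Int) (k : Int) :
    (k ∈ (stepDiffA d b).keys ↔ k ∈ d.keys ∨ k ∈ rowCoordsB b) := by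
  rcases b with _ | ⟨s, _ | ⟨e, _ | ⟨dl, _ | ⟨w, r⟩⟩⟩⟩ <;>
    simp only [stepDiffA, rowCoordsB] <;>
    (try simp) <;>
    simp [PySem.Dict.keys_modify, PySem.Dict.mem_keys_insert] <;>
    tauto

theorem nodup_keys_stepDiffA (d : PySem.Dict Int (Int × Int)) (b : List Int)
    (h : d.keys.Nodup) : (stepDiffA d b).keys.Nodup := by
  have step : ∀ (d' : PySem.Dict Int (Int × Int)) (x : Int) (f : Int × Int → Int × Int),
      d'.keys.Nodup → (d'.modify x (0,0) f).keys.Nodup := by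
    intro d' x f hn
    rw [PySem.Dict.keys_modify]
    exact PySem.Dict.nodup_keys_insert d' x (f (d'.getD x (0, 0))) hn
  rcases b with _ | ⟨s, _ | ⟨e, _ | ⟨dl, _ | ⟨w, r⟩⟩⟩⟩
  · exact h
  · exact h
  · exact h
  · simp only [stepDiffA]
    exact step _ _ _ (step _ _ _ (step _ _ _ (step _ _ _ h)))
  · exact h

theorem keys_foldl_stepDiffA (bs : List (List Int)) (d : PySem.Dict Int (Int × Int))
    (h : d.keys.Nodup) :
    (bs.foldl stepDiffA d).keys.Nodup ∧
      (∀ k, k ∈ (bs.foldl stepDiffA d).keys ↔ k ∈ d.keys ∨ k ∈ bs.flatMap rowCoordsB) := by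
  induction bs generalizing d with
  | nil => simp [h]
  | cons b r ih =>
      obtain ⟨h1, h2⟩ := ih (stepDiffA d b) (nodup_keys_stepDiffA d b h)
      rw [List.foldl_cons]
      refine ⟨h1, fun k => ?_⟩
      rw [h2 k, keys_stepDiffA_mem]
      simp [or_assoc]

theorem coverB_eq_aux (bs : List (List Int)) (x : Int) (p : Int × Int) :
    bs.foldl
      (fun (p : Int × Int) b =>
        match b with
        | [s, e, h] =>
            let t : Int := (if s ≤ x then 1 else 0) - (if e ≤ x then 1 else 0)
            (p.1 + h * t, p.2 + t)
        | _ => p) p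
      = (p.1 + (pvCover bs x).1, p.2 + (pvCover bs x).2) := by
  induction bs generalizing p with
  | nil => simp [pvCover]
  | cons b r ih =>
      rcases b with _ | ⟨s, _ | ⟨e, _ | ⟨dl, _ | ⟨w, rr⟩⟩⟩⟩ <;>
        simp only [List.foldl_cons, ih, pvCover, pvContrib] <;>
        apply Prod.ext <;> simp <;> ring

theorem coverB_eq (bs : List (List Int)) (x : Int) : coverB bs x = pvCover bs x := by
  unfold coverB
  rw [coverB_eq_aux]
  simp

theorem pvIndicator_step (x y s : Int) (hxy : x < y) (hs : s ≤ y → s ≤ x ∨ s = y) :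
    (if s ≤ y then (1:Int) else 0) = (if s ≤ x then 1 else 0) + (if y = s then 1 else 0) := by
  by_cases h1 : s ≤ y
  · rcases hs h1 with h2 | h2
    · have h3 : ¬ y = s := by omega
      simp [h1, h2, h3]
    · have h3 : ¬ s ≤ x := by omega
      have h4 : y = s := h2.symm
      simp [h1, h3, h4]
  · have h2 : ¬ s ≤ x := by omega
    have h3 : ¬ y = s := by omega
    simp [h1, h2, h3]

theorem pvCover_step (bs : List (List Int)) (x y : Int) (hxy : x < y)
    (hz : ∀ z ∈ bs.flatMap rowCoordsB, z ≤ y → z ≤ x ∨ z = y) :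
    pvCover bs y = ((pvCover bs x).1 + (pvDelta bs y).1, (pvCover bs x).2 + (pvDelta bs y).2) := by
  induction bs with
  | nil => simp [pvCover, pvDelta]
  | cons b r ih =>
      have hzr : ∀ z ∈ r.flatMap rowCoordsB, z ≤ y → z ≤ x ∨ z = y := by
        intro z hzm; exact hz z (by simp [hzm])
      have hco : pvContrib y b = ((pvContrib x b).1 + (pvDeltaC y b).1, (pvContrib x b).2 + (pvDeltaC y b).2) := by
        rcases b with _ | ⟨s, _ | ⟨e, _ | ⟨dl, _ | ⟨w, rr⟩⟩⟩⟩ <;> simp [pvContrib, pvDeltaC]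
        have hsm : s ∈ (([s, e, dl] : List Int) :: r).flatMap rowCoordsB := by simp [rowCoordsB]
        have hem : e ∈ (([s, e, dl] : List Int) :: r).flatMap rowCoordsB := by simp [rowCoordsB]
        have h1 := pvIndicator_step x y s hxy (hz s hsm)
        have h2 := pvIndicator_step x y e hxy (hz e hem)
        constructor
        · rw [h1, h2]; ring
        · rw [h1, h2]; ring
      simp only [pvCover, pvDelta, ih hzr, hco]
      apply Prod.ext <;> simp <;> ring

theorem pvCover_zero (bs : List (List Int)) (x : Int)
    (hz : ∀ z ∈ bs.flatMap rowCoordsB, ¬ z ≤ x) : pvCover bs x = (0, 0) := by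
  induction bs with
  | nil => simp [pvCover]
  | cons b r ih =>
      have hzr : ∀ z ∈ r.flatMap rowCoordsB, ¬ z ≤ x := by
        intro z hzm; exact hz z (by simp [hzm])
      have hco : pvContrib x b = (0, 0) := by
        rcases b with _ | ⟨s, _ | ⟨e, _ | ⟨dl, _ | ⟨w, rr⟩⟩⟩⟩ <;> simp [pvContrib]
        have hsm : s ∈ (([s, e, dl] : List Int) :: r).flatMap rowCoordsB := by simp [rowCoordsB]
        have hem : e ∈ (([s, e, dl] : List Int) :: r).flatMap rowCoordsB := by simp [rowCoordsB]
        simp [hz s hsm, hz e hem]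
      simp [pvCover, hco, ih hzr]

-- the chain of states A's cumulative sweep passes through, expressed by absolute coverages
def pvLinked (bs : List (List Int)) : Int → Int → List Int → Prop
  | _, _, [] => True
  | s, c, k :: r =>
      s + (pvDelta bs k).1 = (pvCover bs k).1 ∧ c + (pvDelta bs k).2 = (pvCover bs k).2 ∧
        pvLinked bs (pvCover bs k).1 (pvCover bs k).2 r

theorem pvLinked_of_sorted (bs : List (List Int)) :
    ∀ (ks : List Int) (p : Int), List.Pairwise (· < ·) (p :: ks) →
      (∀ z ∈ bs.flatMap rowCoordsB, z ≤ p ∨ z ∈ ks) →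
      pvLinked bs (pvCover bs p).1 (pvCover bs p).2 ks := by
  intro ks
  induction ks with
  | nil => intro p _ _; trivial
  | cons k r ih =>
      intro p hpw hz
      have hpk : p < k := (List.pairwise_cons.1 hpw).1 k (by simp)
      have hkr : List.Pairwise (· < ·) (k :: r) := (List.pairwise_cons.1 hpw).2
      have hstep : ∀ z ∈ bs.flatMap rowCoordsB, z ≤ k → z ≤ p ∨ z = k := by
        intro z hzm hzk
        rcases hz z hzm with ha | ha
        · exact Or.inl ha
        · simp only [List.mem_cons] at ha
          rcases ha with ha | ha
          · exact Or.inr ha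
          · exfalso
            have := (List.pairwise_cons.1 hkr).1 z ha
            omega
      have hcov := pvCover_step bs p k hpk hstep
      refine ⟨by rw [hcov], by rw [hcov], ?_⟩
      apply ih k hkr
      intro z hzm
      rcases hz z hzm with ha | ha
      · exact Or.inl (by omega)
      · simp only [List.mem_cons] at ha
        rcases ha with ha | ha
        · exact Or.inl (by omega)
        · exact Or.inr ha

theorem sweep_eq (bs : List (List Int)) (d : PySem.Dict Int (Int × Int))
    (hd : ∀ k, d.getD k (0, 0) = pvDelta bs k) :
    ∀ (ks : List Int) (p : Int) (res : List (List Int)),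
      pvLinked bs (pvCover bs p).1 (pvCover bs p).2 ks →
      sweepA d ks res p (pvCover bs p).1 (pvCover bs p).2 =
        sweepB bs ((p :: ks).zip ks) res := by
  intro ks
  induction ks with
  | nil =>
      intro p res _
      simp [sweepA, sweepB]
  | cons k r ih =>
      intro p res hlink
      obtain ⟨hl1, hl2, hl3⟩ := hlink
      rw [List.zip_cons_cons]
      simp only [sweepA, sweepB, hd k, coverB_eq]
      set S := (pvCover bs p).1 with hS
      set C := (pvCover bs p).2 with hC
      have hgetc : PySem.List.pyGetD [p, k, PySem.Int.floordiv S C] (2:Int) 0 = PySem.Int.floordiv S C := by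
        simp [PySem.List.pyGetD, PySem.List.pyGet?, PySem.List.pyIdx?]
      simp only [hgetc]
      rw [hl1, hl2]
      exact ih k _ hl3

-- ===== VERDICT (by name: the statement is the Claim_ definition above) =====
theorem averageHeightOfBuildings_spec : Claim_equal_averageHeightOfBuildings := by
  intro bs _ _
  unfold Spec_averageHeightOfBuildings averageHeightOfBuildings averageHeightOfBuildings_alt
  have hd : ∀ k, (bs.foldl stepDiffA PySem.Dict.empty).getD k (0, 0) = pvDelta bs k :=
    getD_diffA bs
  obtain ⟨hnd, hmem⟩ := keys_foldl_stepDiffA bs PySem.Dict.empty (by simp [PySem.Dict.keys_empty])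
  set coords := bs.flatMap rowCoordsB with hcoords
  set ksB := PySem.List.sorted (PySem.Set.ofList coords) (fun x => x) false with hksB
  have hperm : (bs.foldl stepDiffA PySem.Dict.empty).keys.Perm (PySem.Set.ofList coords) := by
    rw [List.perm_ext_iff_of_nodup hnd (PySem.Set.nodup_ofList coords)]
    intro a
    rw [hmem a, PySem.Set.mem_ofList]
    simp [PySem.Dict.keys_empty]
  have hKS : PySem.List.sorted (bs.foldl stepDiffA PySem.Dict.empty).keys (fun x => x) false = ksB :=
    PySem.List.sorted_eq_sorted_of_perm _ _ _ (fun a b hab => hab) hperm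
  rw [hKS]
  have hpwlt : List.Pairwise (· < ·) ksB := PySem.List.sorted_ofList_pairwise_lt coords
  have hmemks : ∀ z, z ∈ coords → z ∈ ksB := by
    intro z hzc
    rw [hksB, PySem.List.mem_sorted, PySem.Set.mem_ofList]
    exact hzc
  rcases hks : ksB with _ | ⟨k0, rest⟩
  · simp [sweepA, sweepB, hks]
  · rw [hks] at hpwlt hmemks
    have hcov0 : pvCover bs (k0 - 1) = (0, 0) := by
      apply pvCover_zero
      intro z hzm
      have hm := hmemks z hzm
      simp only [List.mem_cons] at hm
      rcases hm with hm | hm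
      · omega
      · have := (List.pairwise_cons.1 hpwlt).1 z hm
        omega
    have hlink : pvLinked bs (pvCover bs (k0 - 1)).1 (pvCover bs (k0 - 1)).2 (k0 :: rest) := by
      apply pvLinked_of_sorted
      · rw [List.pairwise_cons]
        refine ⟨?_, hpwlt⟩
        intro a ha
        simp only [List.mem_cons] at ha
        rcases ha with ha | ha
        · omega
        · have := (List.pairwise_cons.1 hpwlt).1 a ha
          omega
      · intro z hzm
        exact Or.inr (hmemks z hzm)
    rw [hcov0] at hlink
    obtain ⟨hl1, hl2, hl3⟩ := hlink
    simp only at hl1 hl2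
    have hstep0 : sweepA (bs.foldl stepDiffA PySem.Dict.empty) (k0 :: rest) [] 0 0 0 =
        sweepA (bs.foldl stepDiffA PySem.Dict.empty) rest [] k0 (pvCover bs k0).1 (pvCover bs k0).2 := by
      simp only [sweepA, hd k0]
      norm_num
      rw [← hl1, ← hl2]
      norm_num
    rw [hstep0]
    have := sweep_eq bs (bs.foldl stepDiffA PySem.Dict.empty) hd rest k0 [] hl3
    rw [this]
    simp [List.tail]
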